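-- pv_equiv track=rewrite | github.com/dpriskorn/entitybase-backend | debug_q17948861.py | split_subject_blocks
-- ===== SOURCE A (Python) =====
-- def split_subject_blocks(ttl: str) -> dict[str, str]:
--     blocks = {}
--     current_subject = None
--     current_lines = []
--
--     for line in ttl.splitlines():
--         if not line.strip():
--             continue
--
--         line_stripped = line.strip()
--         if line_stripped.lower().startswith("@prefix"):
--             continue
--
--         if line_stripped.startswith("<http") or line_stripped.startswith("<https"):
--             continue
--
--         if line and not line.startswith((" ", "\t")):
--             if current_subject:
--                 blocks[current_subject] = "\n".join(current_lines).strip()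
--             current_subject = line.split()[0]
--             current_lines = [line]
--         else:
--             current_lines.append(line)
--
--     if current_subject:
--         blocks[current_subject] = "\n".join(current_lines).strip()
--
--     return blocks
-- ===== SOURCE B (Python) =====
-- def split_subject_blocks(ttl: str) -> dict[str, str]:
--     def keep(line):
--         s = line.strip()
--         return bool(s) and not s.lower().startswith("@prefix") and not s.startswith("<http")
--
--     lines = [line for line in ttl.splitlines() if keep(line)]
--     starts = [i for i, line in enumerate(lines) if not line.startswith((" ", "\t"))]
--     ends = starts[1:] + [len(lines)]
--     return {lines[s].split()[0]: "\n".join(lines[s:e]).strip()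
--             for s, e in zip(starts, ends)}
-- ===== Notes on version B (the rewrite author's own statement) =====
-- stated objective: alternative
-- what changed: B replaces A's single stateful accumulator loop by staged index-based segmentation: filter the lines, compute the list of header-line positions, pair consecutive positions, and build each block as a slice lines[s:e] in a dict comprehension - no running subject/current_lines state at all.
import Mathlib
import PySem

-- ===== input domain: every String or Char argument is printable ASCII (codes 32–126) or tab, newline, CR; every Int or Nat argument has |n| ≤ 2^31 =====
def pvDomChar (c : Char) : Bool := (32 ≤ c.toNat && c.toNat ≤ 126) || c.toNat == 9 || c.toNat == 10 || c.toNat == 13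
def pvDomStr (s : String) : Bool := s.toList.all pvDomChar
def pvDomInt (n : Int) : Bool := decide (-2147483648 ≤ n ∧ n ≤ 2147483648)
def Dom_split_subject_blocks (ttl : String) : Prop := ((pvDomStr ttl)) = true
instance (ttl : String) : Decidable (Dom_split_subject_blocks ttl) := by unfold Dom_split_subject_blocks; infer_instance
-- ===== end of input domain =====

-- B replaces A's stateful accumulator loop by staged segmentation: header positions + slices (same cost, different decomposition).


-- ===== PORT A =====
-- Python truthiness of Optional[str] (`if current_subject:`)
def pvTruthyStr : Option String → Bool
  | none => false
  | some s => !(s == "")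

-- one iteration of A's `for line in ttl.splitlines():` loop; state = (blocks, current_subject, current_lines)
def pvAStep (st : PySem.Dict String String × Option String × List String) (line : String) :
    PySem.Dict String String × Option String × List String :=
  let (blocks, cs, cl) := st
  if PySem.Str.strip line == "" then st          -- if not line.strip(): continue
  else
    let ls := PySem.Str.strip line
    if PySem.Str.startswith (PySem.Str.lower ls) "@prefix" then st
    else if PySem.Str.startswith ls "<http" || PySem.Str.startswith ls "<https" then st
    else if !(line == "") && !(PySem.Str.startswith line " " || PySem.Str.startswith line "\t") then
      -- header line: flush, then current_subject = line.split()[0] (split() is nonempty here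
      -- because line.strip() is nonempty, so the [0] never raises; headD "" is exact)
      let blocks' := if pvTruthyStr cs then
          blocks.insert (cs.getD "") (PySem.Str.strip (PySem.Str.join "\n" cl))
        else blocks
      (blocks', some ((PySem.Str.split₀ line).headD ""), [line])
    else (blocks, cs, cl ++ [line])

def split_subject_blocks (ttl : String) : List (String × String) :=
  let st := (PySem.Str.splitlines ttl).foldl pvAStep (PySem.Dict.empty, none, [])
  (if pvTruthyStr st.2.1 then
      st.1.insert (st.2.1.getD "") (PySem.Str.strip (PySem.Str.join "\n" st.2.2))
    else st.1).items

-- ===== PORT B =====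
-- keep(line): survives B's filtering pass
def pvKeep (line : String) : Bool :=
  let s := PySem.Str.strip line
  !(s == "") && !(PySem.Str.startswith (PySem.Str.lower s) "@prefix") && !(PySem.Str.startswith s "<http")

-- `not line.startswith((" ", "\t"))`
def pvHeaderB (line : String) : Bool :=
  !(PySem.Str.startswith line " " || PySem.Str.startswith line "\t")

def split_subject_blocks_alt (ttl : String) : List (String × String) :=
  let lines := (PySem.Str.splitlines ttl).filter pvKeep
  let starts := ((PySem.List.enumerate lines 0).filter (fun p => pvHeaderB p.2)).map (·.1)
  let ends := starts.tail ++ [(lines.length : Int)]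
  ((starts.zip ends).foldl
    (fun d p =>
      -- lines[p.1] is always in range (p.1 comes from enumerate), so pyGetD's default is never taken;
      -- lines[p.1].split() is nonempty (kept lines have nonempty strip), so headD "" is exact
      d.insert ((PySem.Str.split₀ (PySem.List.pyGetD lines p.1 "")).headD "")
               (PySem.Str.strip (PySem.Str.join "\n" (PySem.List.slice lines (some p.1) (some p.2)))))
    PySem.Dict.empty).items

-- ===== PRECONDITION & SPEC =====
def Spec_split_subject_blocks (ttl : String) (out : List (String × String)) : Prop := out = split_subject_blocks_alt ttl
instance (ttl : String) (out : List (String × String)) : Decidable (Spec_split_subject_blocks ttl out) := by unfold Spec_split_subject_blocks; infer_instance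

-- ===== CLAIM (what is proved, stated in full; the proofs are below) =====
def Claim_equal_split_subject_blocks : Prop := ∀ (ttl : String), Dom_split_subject_blocks ttl → Spec_split_subject_blocks ttl (split_subject_blocks ttl)

-- ===== LEMMAS AND PROOFS =====

-- `line.startswith((" ", "\t"))` as a single Bool
def pvInd (line : String) : Bool :=
  PySem.Str.startswith line " " || PySem.Str.startswith line "\t"

-- the common characterization both ports are reduced to: the cleaned list cut into
-- maximal segments each starting with a non-indented line, pre-header lines dropped
def pvChunks : List String → List (List String)
  | [] => []
  | l :: rest =>
    if pvInd l then pvChunks rest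
    else (l :: rest.takeWhile pvInd) :: pvChunks (rest.dropWhile pvInd)
termination_by ls => ls.length
decreasing_by
  · simp
  · have := List.length_dropWhile_le pvInd rest
    simp; omega

def pvFlushC (d : PySem.Dict String String) (c : List String) : PySem.Dict String String :=
  d.insert ((PySem.Str.split₀ (c.headD "")).headD "") (PySem.Str.strip (PySem.Str.join "\n" c))

-- A's final flush as a function of the loop state
def pvFinA (st : PySem.Dict String String × Option String × List String) : PySem.Dict String String :=
  if pvTruthyStr st.2.1 then
    st.1.insert (st.2.1.getD "") (PySem.Str.strip (PySem.Str.join "\n" st.2.2))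
  else st.1

-- ---- generic facts about kept lines (shared by both reductions) ----

theorem pvGo_ne_nil (s cur : List Char) (acc : List (List Char)) (h : ∀ p ∈ acc, p ≠ []) :
    ∀ p ∈ PySem.Chars.split₀.go s cur acc, p ≠ [] := by
  induction s generalizing cur acc with
  | nil =>
    intro p hp
    simp only [PySem.Chars.split₀.go] at hp
    split at hp
    · exact h p (by simpa using hp)
    · rename_i hcur
      rw [List.reverse_cons] at hp
      rcases List.mem_append.1 hp with h1 | h1
      · exact h p (by simpa using h1)
      · have : p = cur.reverse := by simpa using h1
        subst this
        simpa using fun e => hcur (by simp [e])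
  | cons c rest ih =>
    intro p hp
    simp only [PySem.Chars.split₀.go] at hp
    split at hp
    · split at hp
      · exact ih _ _ h p hp
      · rename_i hcur
        refine ih _ _ ?_ p hp
        intro q hq
        rcases List.mem_cons.1 hq with rfl | hq
        · simpa using fun e => hcur (by simp [e])
        · exact h q hq
    · exact ih _ _ h p hp

theorem pvGo_nonempty (s cur : List Char) (acc : List (List Char))
    (h : acc ≠ [] ∨ cur ≠ [] ∨ ∃ c ∈ s, ¬ (PySem.Chars.isspace c = true)) :
    PySem.Chars.split₀.go s cur acc ≠ [] := by
  induction s generalizing cur acc with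
  | nil =>
    simp only [PySem.Chars.split₀.go]
    split
    · rename_i hcur
      rcases h with h | h | h
      · simpa using h
      · exact absurd (List.isEmpty_iff.1 hcur) h
      · simp at h
    · simp
  | cons c rest ih =>
    simp only [PySem.Chars.split₀.go]
    split
    · rename_i hsp
      split
      · rename_i hcur
        refine ih _ _ ?_
        rcases h with h | h | h
        · exact Or.inl h
        · exact absurd (List.isEmpty_iff.1 hcur) h
        · rcases h with ⟨d, hd, hds⟩
          rcases List.mem_cons.1 hd with rfl | hd
          · exact absurd hsp hds
          · exact Or.inr (Or.inr ⟨d, hd, hds⟩)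
      · exact ih _ _ (Or.inl (by simp))
    · exact ih _ _ (Or.inr (Or.inl (by simp)))

theorem pvStrip_exists (line : String) (h : ¬ (PySem.Str.strip line == "") = true) :
    ∃ c ∈ line.toList, ¬ (PySem.Chars.isspace c = true) := by
  by_contra hc
  push Not at hc
  apply h
  have hchars : PySem.Chars.strip line.toList = [] := by
    have hl : PySem.Chars.lstrip line.toList = [] :=
      List.dropWhile_eq_nil_iff.2 (by intro x hx; exact hc x hx)
    simp [PySem.Chars.strip, hl, PySem.Chars.rstrip]
  have ht : (PySem.Str.strip line).toList = [] := by
    rw [PySem.Str.toList_strip]; exact hchars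
  simp [String.toList_eq_nil_iff.1 ht]

theorem pvHead_word_ne (line : String) (h : ¬ (PySem.Str.strip line == "") = true) :
    ((PySem.Str.split₀ line).headD "") ≠ "" := by
  obtain ⟨c, hc, hcs⟩ := pvStrip_exists line h
  have hne : PySem.Chars.split₀.go line.toList [] [] ≠ [] :=
    pvGo_nonempty _ _ _ (Or.inr (Or.inr ⟨c, hc, hcs⟩))
  have hall : ∀ p ∈ PySem.Chars.split₀.go line.toList [] [], p ≠ [] :=
    pvGo_ne_nil _ _ _ (by simp)
  unfold PySem.Str.split₀ PySem.Chars.split₀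
  cases hgo : PySem.Chars.split₀.go line.toList [] [] with
  | nil => exact absurd hgo hne
  | cons p ps =>
    have hp : p ≠ [] := hall p (by rw [hgo]; simp)
    simp only [List.map_cons, List.headD_cons]
    intro he
    apply hp
    simpa using congrArg String.toList he

theorem pvHttps_http (s : String) (h : PySem.Str.startswith s "<https" = true) :
    PySem.Str.startswith s "<http" = true := by
  rw [PySem.Str.startswith_eq, PySem.Chars.startswith_iff] at h ⊢
  exact List.IsPrefix.trans (by decide) h

theorem pvKeep_iff (line : String) : pvKeep line = true ↔
    ((PySem.Str.strip line == "") = false ∧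
     PySem.Str.startswith (PySem.Str.lower (PySem.Str.strip line)) "@prefix" = false ∧
     PySem.Str.startswith (PySem.Str.strip line) "<http" = false) := by
  simp only [pvKeep, Bool.and_eq_true, Bool.not_eq_true']
  rw [and_assoc]

theorem pvKeep_parts (line : String) (hk : pvKeep line = true) :
    (PySem.Str.strip line == "") = false ∧
    PySem.Str.startswith (PySem.Str.lower (PySem.Str.strip line)) "@prefix" = false ∧
    (PySem.Str.startswith (PySem.Str.strip line) "<http" || PySem.Str.startswith (PySem.Str.strip line) "<https") = false ∧
    (line == "") = false := by
  obtain ⟨h1, h2, h3⟩ := (pvKeep_iff line).1 hk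
  have h3' : PySem.Str.startswith (PySem.Str.strip line) "<https" = false := by
    rcases Bool.eq_false_or_eq_true (PySem.Str.startswith (PySem.Str.strip line) "<https") with e | e
    · exact absurd (pvHttps_http _ e) (ne_true_of_eq_false h3)
    · exact e
  refine ⟨h1, h2, by rw [h3, h3']; rfl, ?_⟩
  rcases Bool.eq_false_or_eq_true (line == "") with e | e
  · have : line = "" := by simpa using e
    subst this
    exact absurd h1 (by decide)
  · exact e

-- ---- reduction of PORT A to pvChunks ----

theorem pvAStep_skip (st : PySem.Dict String String × Option String × List String) (line : String)
    (h : pvKeep line = false) : pvAStep st line = st := by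
  obtain ⟨blocks, cs, cl⟩ := st
  by_cases h1 : (PySem.Str.strip line == "") = true
  · simp only [pvAStep, h1, reduceIte]
  · have h1' : (PySem.Str.strip line == "") = false := by simpa using h1
    by_cases h2 : PySem.Str.startswith (PySem.Str.lower (PySem.Str.strip line)) "@prefix" = true
    · simp only [pvAStep, h1', h2, reduceIte, Bool.false_eq_true, ite_self]
    · have h2' : PySem.Str.startswith (PySem.Str.lower (PySem.Str.strip line)) "@prefix" = false := by
        simpa using h2
      have h3 : PySem.Str.startswith (PySem.Str.strip line) "<http" = true := by
        rcases Bool.eq_false_or_eq_true (PySem.Str.startswith (PySem.Str.strip line) "<http") with e | e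
        · exact e
        · exact absurd ((pvKeep_iff line).2 ⟨h1', h2', e⟩) (by simp [h])
      simp only [pvAStep, h1', h2', h3, reduceIte, Bool.false_eq_true, ite_self,
        Bool.true_or]

theorem pvFoldA_filter (lines : List String)
    (st : PySem.Dict String String × Option String × List String) :
    lines.foldl pvAStep st = (lines.filter pvKeep).foldl pvAStep st := by
  induction lines generalizing st with
  | nil => rfl
  | cons l ls ih =>
    by_cases hl : pvKeep l = true
    · simp [hl, List.foldl_cons, ih]
    · rw [List.foldl_cons, pvAStep_skip st l (by simpa using hl)]
      simp [hl, ih]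

theorem pvAStep_indent (blocks : PySem.Dict String String) (cs : Option String) (cl : List String)
    (line : String) (hk : pvKeep line = true) (hsp : pvInd line = true) :
    pvAStep (blocks, cs, cl) line = (blocks, cs, cl ++ [line]) := by
  obtain ⟨h1, h2, h3, _⟩ := pvKeep_parts line hk
  rw [pvInd] at hsp
  simp only [pvAStep, h1, h2, h3, hsp, Bool.false_eq_true, if_false,
    Bool.not_true, Bool.and_false]

theorem pvAStep_header (blocks : PySem.Dict String String) (cs : Option String) (cl : List String)
    (line : String) (hk : pvKeep line = true) (hsp : pvInd line = false) :
    pvAStep (blocks, cs, cl) line =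
      ((if pvTruthyStr cs then blocks.insert (cs.getD "") (PySem.Str.strip (PySem.Str.join "\n" cl)) else blocks),
       some ((PySem.Str.split₀ line).headD ""), [line]) := by
  obtain ⟨h1, h2, h3, hl⟩ := pvKeep_parts line hk
  rw [pvInd] at hsp
  simp only [pvAStep, h1, h2, h3, hsp, hl, Bool.false_eq_true, if_false,
    Bool.not_false, Bool.and_true, if_true]

theorem pvHeadD_append (cl : List String) (l : String) (h : cl ≠ []) :
    (cl ++ [l]).headD "" = cl.headD "" := by
  cases cl with
  | nil => exact absurd rfl h
  | cons a as => rfl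

-- A's loop from a live subject: ls's leading indented lines extend the open chunk cl
theorem pvA_live (ls : List String) (d : PySem.Dict String String) (cl : List String)
    (hk : ∀ l ∈ ls, pvKeep l = true) (hcl : cl ≠ [])
    (hw0 : ((PySem.Str.split₀ (cl.headD "")).headD "") ≠ "") :
    pvFinA (ls.foldl pvAStep (d, some ((PySem.Str.split₀ (cl.headD "")).headD ""), cl)) =
      ((cl ++ ls.takeWhile pvInd) :: pvChunks (ls.dropWhile pvInd)).foldl pvFlushC d := by
  induction ls generalizing d cl with
  | nil =>
    have htr : pvTruthyStr (some ((PySem.Str.split₀ (cl.headD "")).headD "")) = true := by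
      simp only [pvTruthyStr, Bool.not_eq_eq_eq_not]
      simpa using hw0
    simp only [List.foldl_nil, List.takeWhile_nil, List.dropWhile_nil, pvChunks,
      List.append_nil, List.foldl_cons, pvFinA, htr, if_true, pvFlushC, Option.getD_some]
  | cons l ls' ih =>
    have hkl : pvKeep l = true := hk l (by simp)
    have hk' : ∀ x ∈ ls', pvKeep x = true := fun x hx => hk x (List.mem_cons_of_mem _ hx)
    rcases Bool.eq_false_or_eq_true (pvInd l) with hi | hi
    · -- indented line: append to cl
      rw [List.foldl_cons, pvAStep_indent d _ cl l hkl hi]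
      have hh : (cl ++ [l]).headD "" = cl.headD "" := pvHeadD_append cl l hcl
      have hrec := ih d (cl ++ [l]) hk' (by simp) (by rw [hh]; exact hw0)
      rw [hh] at hrec
      rw [hrec, List.takeWhile_cons_of_pos hi, List.dropWhile_cons_of_pos hi]
      simp
    · -- header line: flush cl, restart at l
      rw [List.foldl_cons, pvAStep_header d _ cl l hkl hi]
      have htr : pvTruthyStr (some ((PySem.Str.split₀ (cl.headD "")).headD "")) = true := by
        simp only [pvTruthyStr, Bool.not_eq_eq_eq_not]
        simpa using hw0
      rw [htr, if_pos rfl]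
      have hwl : ((PySem.Str.split₀ l).headD "") ≠ "" :=
        pvHead_word_ne l (by simp [(pvKeep_parts l hkl).1])
      have hrec := ih (d.insert ((PySem.Str.split₀ (cl.headD "")).headD "")
          (PySem.Str.strip (PySem.Str.join "\n" cl))) [l] hk' (by simp) (by simpa using hwl)
      simp only [List.headD_cons] at hrec
      simp only [Option.getD_some]
      rw [hrec, List.takeWhile_cons_of_neg (by simp [hi]), List.dropWhile_cons_of_neg (by simp [hi])]
      rw [pvChunks, if_neg (by simp [hi])]
      simp only [List.append_nil, List.foldl_cons, pvFlushC]
      rfl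

-- A's loop before the first header: accumulated pre-header lines are discarded
theorem pvA_pre (ls : List String) (d : PySem.Dict String String) (cl : List String)
    (hk : ∀ l ∈ ls, pvKeep l = true) :
    pvFinA (ls.foldl pvAStep (d, none, cl)) = (pvChunks ls).foldl pvFlushC d := by
  induction ls generalizing cl with
  | nil => simp [pvFinA, pvTruthyStr, pvChunks]
  | cons l ls' ih =>
    have hkl : pvKeep l = true := hk l (by simp)
    have hk' : ∀ x ∈ ls', pvKeep x = true := fun x hx => hk x (List.mem_cons_of_mem _ hx)
    rcases Bool.eq_false_or_eq_true (pvInd l) with hi | hi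
    · rw [List.foldl_cons, pvAStep_indent d none cl l hkl hi, ih _ hk', pvChunks, if_pos hi]
    · rw [List.foldl_cons, pvAStep_header d none cl l hkl hi]
      simp only [pvTruthyStr, Bool.false_eq_true, if_false]
      have hwl : ((PySem.Str.split₀ l).headD "") ≠ "" :=
        pvHead_word_ne l (by simp [(pvKeep_parts l hkl).1])
      have hrec := pvA_live ls' d [l] hk' (by simp) (by simpa using hwl)
      simp only [List.headD_cons] at hrec
      rw [hrec, pvChunks, if_neg (by simp [hi]), List.foldl_cons, List.foldl_cons]
      rfl

-- ---- reduction of PORT B to pvChunks ----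

-- header positions as plain Nats (B's `starts` is their Int image; proved below)
def pvNS : List String → List Nat
  | [] => []
  | l :: rest => if pvInd l then (pvNS rest).map (· + 1) else 0 :: (pvNS rest).map (· + 1)

-- B's insertion step, re-indexed over Nat pairs
def pvStepNat (lines : List String) (d : PySem.Dict String String) (p : Nat × Nat) :
    PySem.Dict String String :=
  d.insert ((PySem.Str.split₀ (lines.getD p.1 "")).headD "")
           (PySem.Str.strip (PySem.Str.join "\n" ((lines.drop p.1).take (p.2 - p.1))))

theorem pvStarts_eq (ls : List String) (s : Int) :
    (((PySem.List.enumerate ls s).filter (fun p => pvHeaderB p.2)).map (·.1))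
      = (pvNS ls).map (fun k : Nat => s + (k : Int)) := by
  induction ls generalizing s with
  | nil => simp [pvNS, PySem.List.enumerate_nil]
  | cons l rest ih =>
    rw [PySem.List.enumerate_cons, List.filter_cons]
    have hB : pvHeaderB l = !pvInd l := rfl
    rcases Bool.eq_false_or_eq_true (pvInd l) with hi | hi
    · rw [hB, hi]
      simp only [Bool.not_true, Bool.false_eq_true, if_false]
      rw [ih, pvNS, if_pos hi, List.map_map]
      apply List.map_congr_left
      intro k _
      simp only [Function.comp_apply]
      push_cast
      ring
    · rw [hB, hi]
      simp only [Bool.not_false, if_true, List.map_cons]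
      rw [ih, pvNS, if_neg (by simp [hi]), List.map_cons, List.map_map]
      congr 1
      · simp
      apply List.map_congr_left
      intro k _
      simp only [Function.comp_apply]
      push_cast
      ring

-- the first header position of `rest` cuts it at takeWhile/dropWhile
theorem pvNS_first (rest : List String) :
    rest.take ((pvNS rest).headD rest.length) = rest.takeWhile pvInd ∧
    rest.drop ((pvNS rest).headD rest.length) = rest.dropWhile pvInd := by
  induction rest with
  | nil => simp [pvNS]
  | cons r rr ih =>
    rcases Bool.eq_false_or_eq_true (pvInd r) with hi | hi
    · rw [pvNS, if_pos hi]
      have hh : ((pvNS rr).map (· + 1)).headD (rr.length + 1) = (pvNS rr).headD rr.length + 1 := by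
        cases pvNS rr <;> simp
      rw [List.takeWhile_cons_of_pos hi, List.dropWhile_cons_of_pos hi]
      constructor
      · rw [show (r :: rr).length = rr.length + 1 from rfl, hh, List.take_succ_cons, ih.1]
      · rw [show (r :: rr).length = rr.length + 1 from rfl, hh, List.drop_succ_cons, ih.2]
    · rw [pvNS, if_neg (by simp [hi])]
      rw [List.takeWhile_cons_of_neg (by simp [hi]), List.dropWhile_cons_of_neg (by simp [hi])]
      simp

theorem pvChunks_dropWhile (ls : List String) : pvChunks (ls.dropWhile pvInd) = pvChunks ls := by
  induction ls with
  | nil => rfl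
  | cons l rest ih =>
    rcases Bool.eq_false_or_eq_true (pvInd l) with hi | hi
    · rw [List.dropWhile_cons_of_pos hi, ih, pvChunks, if_pos hi]
    · rw [List.dropWhile_cons_of_neg (by simp [hi])]

-- shifting every index pair by one steps over a prepended line
theorem pvShift (l : String) (rest : List String) (d : PySem.Dict String String)
    (L : List (Nat × Nat)) :
    (L.map (Prod.map (· + 1) (· + 1))).foldl (pvStepNat (l :: rest)) d
      = L.foldl (pvStepNat rest) d := by
  rw [List.foldl_map]
  apply PySem.List.foldl_congr_mem
  intro acc x _
  simp [pvStepNat, Nat.add_sub_add_right]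

-- the Nat-indexed segmentation fold computes the chunk flushes
set_option maxHeartbeats 1000000 in
theorem pvSegNat (ls : List String) (d : PySem.Dict String String) :
    ((pvNS ls).zip ((pvNS ls).tail ++ [ls.length])).foldl (pvStepNat ls) d
      = (pvChunks ls).foldl pvFlushC d := by
  induction ls generalizing d with
  | nil => simp [pvNS, pvChunks]
  | cons l rest ih =>
    rcases Bool.eq_false_or_eq_true (pvInd l) with hi | hi
    · -- indented head: every index shifts by one
      rw [pvNS, if_pos hi, pvChunks, if_pos hi]
      have htail : ((pvNS rest).map (· + 1)).tail ++ [(l :: rest).length]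
          = ((pvNS rest).tail ++ [rest.length]).map (· + 1) := by
        cases pvNS rest <;> simp
      rw [htail, List.zip_map, pvShift l rest d, ih d]
    · -- header at position 0
      rw [pvNS, if_neg (by simp [hi]), pvChunks, if_neg (by simp [hi])]
      have hsec : (0 :: (pvNS rest).map (· + 1)).tail ++ [(l :: rest).length]
          = ((pvNS rest) ++ [rest.length]).map (· + 1) := by simp
      rw [hsec]
      cases hns : pvNS rest with
      | nil =>
        have hfirst := pvNS_first rest
        rw [hns] at hfirst
        simp only [List.headD_nil] at hfirst
        simp only [List.map_nil, List.map_cons, List.nil_append,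
          List.zip_cons_cons, List.zip_nil_left, List.foldl_cons, List.foldl_nil]
        rw [← hfirst.1]
        have hdw : rest.dropWhile pvInd = [] := by
          rw [← hfirst.2]; simp
        rw [hdw]
        simp only [pvChunks, List.foldl_nil]
        simp [pvStepNat, pvFlushC, List.take_succ_cons, List.take_length]
      | cons h0 ns =>
        have hfirst := pvNS_first rest
        rw [hns] at hfirst
        simp only [List.headD_cons] at hfirst
        simp only [List.cons_append, List.map_cons, List.zip_cons_cons, List.foldl_cons]
        rw [show ((h0 + 1) :: ns.map (· + 1) : List Nat) = (h0 :: ns).map (· + 1) from rfl]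
        rw [List.zip_map]
        rw [pvShift l rest]
        rw [show (h0 :: ns).zip (ns ++ [rest.length])
            = (pvNS rest).zip ((pvNS rest).tail ++ [rest.length]) from by
              rw [hns, List.tail_cons]]
        rw [ih]
        rw [← pvChunks_dropWhile rest]
        congr 1
        -- the first insertion is the flush of the chunk headed by l
        simp only [pvStepNat, pvFlushC, List.getD_cons_zero, List.drop_zero, Nat.sub_zero,
          List.take_succ_cons, List.headD_cons, hfirst.1]

-- ===== VERDICT (by name: the statement is the Claim_ definition above) =====
theorem split_subject_blocks_spec : Claim_equal_split_subject_blocks := by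
  intro ttl _
  show split_subject_blocks ttl = split_subject_blocks_alt ttl
  unfold split_subject_blocks split_subject_blocks_alt
  simp only []
  rw [pvFoldA_filter]
  have hk : ∀ l ∈ (PySem.Str.splitlines ttl).filter pvKeep, pvKeep l = true :=
    fun l hl => (List.mem_filter.1 hl).2
  have hA := pvA_pre ((PySem.Str.splitlines ttl).filter pvKeep) PySem.Dict.empty [] hk
  rw [show (if pvTruthyStr (((PySem.Str.splitlines ttl).filter pvKeep).foldl pvAStep
        (PySem.Dict.empty, none, [])).2.1 then _ else _) =
      pvFinA (((PySem.Str.splitlines ttl).filter pvKeep).foldl pvAStep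
        (PySem.Dict.empty, none, [])) from rfl, hA]
  -- B side
  set lines := (PySem.Str.splitlines ttl).filter pvKeep with hlines
  rw [pvStarts_eq lines 0]
  have hz : ((pvNS lines).map (fun k : Nat => (0 : Int) + (k : Int)))
      = (pvNS lines).map (fun k : Nat => (k : Int)) := by
    apply List.map_congr_left; intro k _; ring
  rw [hz]
  have htail : ((pvNS lines).map (fun k : Nat => (k : Int))).tail ++ [(lines.length : Int)]
      = ((pvNS lines).tail ++ [lines.length]).map (fun k : Nat => (k : Int)) := by
    cases pvNS lines with
    | nil => simp only [List.map_nil, List.tail_nil, List.nil_append, List.map_cons]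
    | cons a t => simp only [List.map_cons, List.tail_cons, List.map_append, List.map_nil]
  rw [htail, List.zip_map, List.foldl_map]
  congr 1
  rw [← pvSegNat lines PySem.Dict.empty]
  apply PySem.List.foldl_congr_mem
  intro acc x _
  obtain ⟨a, b⟩ := x
  simp only [Prod.map, PySem.List.pyGetD_natCast, PySem.List.slice_natCast, pvStepNat]
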